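-- pv_equiv track=rewrite | github.com/nuwandianusarani/HireGenius | Backend/app/cv_processing.py | extract_courses_certifications_achievements
-- ===== SOURCE A (Python) =====
-- def extract_courses_certifications_achievements(cv_text):
--     sections = []
--
--     course_keywords = ['course', 'certification', 'training', 'online course', 'workshop']
--     achievement_keywords = ['achievement', 'award', 'recognition', 'honor', 'milestone']
--
--     lines = cv_text.split('\n')
--     current_section = None
--     current_section_type = None
--
--     for line in lines:
--         line_lower = line.lower().strip()
--
--         if any(keyword in line_lower for keyword in course_keywords):
--             if current_section:
--                 sections.append({'type': current_section_type, 'content': current_section.strip()})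
--             current_section = line.strip()
--             current_section_type = 'Courses/Certifications'
--         elif any(keyword in line_lower for keyword in achievement_keywords):
--             if current_section:
--                 sections.append({'type': current_section_type, 'content': current_section.strip()})
--             current_section = line.strip()
--             current_section_type = 'Achievements'
--         elif current_section:
--             current_section += " " + line.strip()
--
--     if current_section:
--         sections.append({'type': current_section_type, 'content': current_section.strip()})
--
--     return sections
-- ===== SOURCE B (Python) =====
-- def extract_courses_certifications_achievements(cv_text):
--     course_keywords = ['course', 'certification', 'training', 'online course', 'workshop']
--     achievement_keywords = ['achievement', 'award', 'recognition', 'honor', 'milestone']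
--
--     def classify(line):
--         ll = line.lower().strip()
--         if any(k in ll for k in course_keywords):
--             return 'Courses/Certifications'
--         if any(k in ll for k in achievement_keywords):
--             return 'Achievements'
--         return None
--
--     sections = []
--     pending = []
--     for line in reversed(cv_text.split('\n')):
--         stripped = line.strip()
--         t = classify(line)
--         if t is None:
--             pending = [stripped] + pending
--         else:
--             content = ' '.join([stripped] + pending).strip()
--             sections = [{'type': t, 'content': content}] + sections
--             pending = []
--     return sections
-- ===== Notes on version B (the rewrite author's own statement) =====
-- stated objective: alternative
-- what changed: B replaces A's stateful left-to-right scan with a mutable running string and truthiness-tested current-section by a single right-to-left pass that classifies each line once, collects stripped lines in a pending list, and emits each section at its header as a space-join of the header plus pending lines.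
import Mathlib
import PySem

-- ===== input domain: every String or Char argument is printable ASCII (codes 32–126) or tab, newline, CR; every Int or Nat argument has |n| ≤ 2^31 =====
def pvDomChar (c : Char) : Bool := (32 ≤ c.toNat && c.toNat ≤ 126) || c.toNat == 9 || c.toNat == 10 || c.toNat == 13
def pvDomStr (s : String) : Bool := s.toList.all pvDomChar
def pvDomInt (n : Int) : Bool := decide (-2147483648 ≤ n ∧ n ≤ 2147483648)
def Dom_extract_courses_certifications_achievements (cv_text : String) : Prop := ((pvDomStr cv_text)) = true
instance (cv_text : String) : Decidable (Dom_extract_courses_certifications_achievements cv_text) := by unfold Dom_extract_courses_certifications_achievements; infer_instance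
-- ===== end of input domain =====

-- B re-groups the lines RIGHT-TO-LEFT (one pass, no running-string state, sections prepended);
-- objective: alternative decomposition, same exact return value. No mutation of arguments.

-- ===== PORT A =====
def pvA_courseKw : List (List Char) :=
  ["course".toList, "certification".toList, "training".toList, "online course".toList, "workshop".toList]
def pvA_achKw : List (List Char) :=
  ["achievement".toList, "award".toList, "recognition".toList, "honor".toList, "milestone".toList]

-- Python truthiness of `current_section` (None or str)
def pvA_truthy : Option (List Char) → Bool
  | none => false
  | some c => !c.isEmpty

def pvA_emit (cur : Option (List Char)) (typ : Option String) : List (String × String) :=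
  [("type", typ.getD ""), ("content", String.ofList (PySem.Chars.strip (cur.getD [])))]

def pvA_loop : List (List Char) → List (List (String × String)) → Option (List Char) → Option String →
    List (List (String × String))
  | [], sections, cur, typ =>
      if pvA_truthy cur then sections ++ [pvA_emit cur typ] else sections
  | line :: rest, sections, cur, typ =>
      let ll := PySem.Chars.strip (PySem.Chars.lower line)
      if pvA_courseKw.any (fun k => PySem.Chars.isIn k ll) then
        pvA_loop rest (if pvA_truthy cur then sections ++ [pvA_emit cur typ] else sections)
          (some (PySem.Chars.strip line)) (some "Courses/Certifications")
      else if pvA_achKw.any (fun k => PySem.Chars.isIn k ll) then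
        pvA_loop rest (if pvA_truthy cur then sections ++ [pvA_emit cur typ] else sections)
          (some (PySem.Chars.strip line)) (some "Achievements")
      else if pvA_truthy cur then
        pvA_loop rest sections (some (cur.getD [] ++ ' ' :: PySem.Chars.strip line)) typ
      else
        pvA_loop rest sections cur typ

def extract_courses_certifications_achievements (cv_text : String) : List (List (String × String)) :=
  pvA_loop (PySem.Chars.splitOn cv_text.toList ['\n']) [] none none

-- ===== PORT B =====
def pvB_courseKw : List (List Char) :=
  ["course".toList, "certification".toList, "training".toList, "online course".toList, "workshop".toList]
def pvB_achKw : List (List Char) :=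
  ["achievement".toList, "award".toList, "recognition".toList, "honor".toList, "milestone".toList]

def pvB_classify (line : List Char) : Option String :=
  let ll := PySem.Chars.strip (PySem.Chars.lower line)
  if pvB_courseKw.any (fun k => PySem.Chars.isIn k ll) then some "Courses/Certifications"
  else if pvB_achKw.any (fun k => PySem.Chars.isIn k ll) then some "Achievements"
  else none

-- Source B's reversed(...) loop with state (sections, pending), read right-to-left = structural recursion
def pvB_rec : List (List Char) → List (List (String × String)) × List (List Char)
  | [] => ([], [])
  | line :: rest =>
      let (sections, pending) := pvB_rec rest
      let stripped := PySem.Chars.strip line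
      match pvB_classify line with
      | none => (sections, stripped :: pending)
      | some t =>
          ([("type", t),
            ("content", String.ofList (PySem.Chars.strip (PySem.Chars.join [' '] (stripped :: pending))))] :: sections,
           [])

def extract_courses_certifications_achievements_alt (cv_text : String) : List (List (String × String)) :=
  (pvB_rec (PySem.Chars.splitOn cv_text.toList ['\n'])).1

-- ===== PRECONDITION & SPEC =====
def Spec_extract_courses_certifications_achievements (cv_text : String) (out : List (List (String × String))) : Prop := out = extract_courses_certifications_achievements_alt cv_text
instance (cv_text : String) (out : List (List (String × String))) : Decidable (Spec_extract_courses_certifications_achievements cv_text out) := by unfold Spec_extract_courses_certifications_achievements; infer_instance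

-- ===== CLAIM (what is proved, stated in full; the proofs are below) =====
def Claim_equal_extract_courses_certifications_achievements : Prop := ∀ (cv_text : String), Dom_extract_courses_certifications_achievements cv_text → Spec_extract_courses_certifications_achievements cv_text (extract_courses_certifications_achievements cv_text)

-- ===== LEMMAS AND PROOFS =====

lemma pv_isspace_lowerChar (c : Char) :
    PySem.Chars.isspace (PySem.Chars.lowerChar c) = PySem.Chars.isspace c := by
  by_cases h : PySem.Chars.isupper c = true
  · have hn : 65 ≤ c.toNat ∧ c.toNat ≤ 90 := by
      have := h
      simp only [PySem.Chars.isupper, Bool.and_eq_true, decide_eq_true_eq] at this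
      exact ⟨this.1, this.2⟩
    have hv : (c.toNat + 32).isValidChar := by
      constructor ; omega
    have ht : (Char.ofNat (c.toNat + 32)).toNat = c.toNat + 32 := by
      rw [Char.toNat_ofNat, if_pos hv]
    simp only [PySem.Chars.lowerChar, h, if_pos]
    simp only [PySem.Chars.isspace, ht]
    have h1 := hn.1; have h2 := hn.2
    rw [Bool.eq_iff_iff]
    simp only [Bool.or_eq_true, Bool.and_eq_true, decide_eq_true_eq]
    omega
  · simp only [PySem.Chars.lowerChar]
    rw [if_neg h]

lemma pv_strip_eq_nil_iff (cs : List Char) :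
    PySem.Chars.strip cs = [] ↔ ∀ c ∈ cs, PySem.Chars.isspace c := by
  simp only [PySem.Chars.strip, PySem.Chars.rstrip, PySem.Chars.lstrip,
    List.reverse_eq_nil_iff, List.dropWhile_eq_nil_iff, List.mem_reverse]
  constructor
  · intro h c hc
    rw [← List.takeWhile_append_dropWhile (p := PySem.Chars.isspace) (l := cs)] at hc
    rcases List.mem_append.1 hc with h1 | h2
    · exact List.mem_takeWhile_imp h1
    · exact h c h2
  · intro h c hc
    exact h c ((List.dropWhile_sublist _).subset hc)

lemma pv_strip_lower_ne (line : List Char)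
    (h : PySem.Chars.strip (PySem.Chars.lower line) ≠ []) : PySem.Chars.strip line ≠ [] := by
  intro hnil
  apply h
  rw [pv_strip_eq_nil_iff] at hnil ⊢
  intro c hc
  simp only [PySem.Chars.lower, List.mem_map] at hc
  obtain ⟨d, hd, rfl⟩ := hc
  rw [pv_isspace_lowerChar]
  exact hnil d hd

lemma pv_classify_strip_ne (line : List Char) (t : String)
    (h : pvB_classify line = some t) : PySem.Chars.strip line ≠ [] := by
  apply pv_strip_lower_ne
  intro hll
  have hc : pvB_courseKw.any (fun k => PySem.Chars.isIn k ([] : List Char)) = false := by decide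
  have ha : pvB_achKw.any (fun k => PySem.Chars.isIn k ([] : List Char)) = false := by decide
  simp only [pvB_classify, hll, hc, ha] at h
  simp at h

lemma pv_join_absorb (a b : List Char) (ps : List (List Char)) :
    PySem.Chars.join [' '] ((a ++ ' ' :: b) :: ps) = PySem.Chars.join [' '] (a :: b :: ps) := by
  cases ps with
  | nil =>
      rw [PySem.Chars.join_singleton, PySem.Chars.join_cons_cons, PySem.Chars.join_singleton]
      simp
  | cons p ps =>
      rw [PySem.Chars.join_cons_cons, PySem.Chars.join_cons_cons, PySem.Chars.join_cons_cons]
      simp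

lemma pv_loop_eq (lines : List (List Char)) :
    ∀ (secs : List (List (String × String))) (cur : Option (List Char)) (typ : Option String),
    pvA_loop lines secs cur typ = secs ++
      (if pvA_truthy cur then
        [("type", typ.getD ""),
         ("content", String.ofList (PySem.Chars.strip
            (PySem.Chars.join [' '] (cur.getD [] :: (pvB_rec lines).2))))] :: (pvB_rec lines).1
       else (pvB_rec lines).1) := by
  induction lines with
  | nil =>
      intro secs cur typ
      simp only [pvA_loop, pvB_rec, pvA_emit, PySem.Chars.join_singleton]
      cases cur with
      | none => simp [pvA_truthy]
      | some c => by_cases hc : c.isEmpty <;> simp [pvA_truthy, hc]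
  | cons line rest ih =>
      intro secs cur typ
      by_cases h1 : pvA_courseKw.any
          (fun k => PySem.Chars.isIn k (PySem.Chars.strip (PySem.Chars.lower line))) = true
      · have hcl : pvB_classify line = some "Courses/Certifications" := by
          simp only [pvB_classify]
          rw [if_pos (by exact h1)]
        have hne : PySem.Chars.strip line ≠ [] := pv_classify_strip_ne _ _ hcl
        simp only [pvA_loop, h1, if_pos]
        rw [ih]
        simp only [pvB_rec, hcl]
        have htr : pvA_truthy (some (PySem.Chars.strip line)) = true := by
          simp [pvA_truthy, hne]
        rw [htr]
        simp only [Option.getD_some, PySem.Chars.join_singleton, pvA_emit]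
        cases hcur : pvA_truthy cur <;> simp
      · by_cases h2 : pvA_achKw.any
            (fun k => PySem.Chars.isIn k (PySem.Chars.strip (PySem.Chars.lower line))) = true
        · have hcl : pvB_classify line = some "Achievements" := by
            simp only [pvB_classify]
            rw [if_neg (by exact h1), if_pos (by exact h2)]
          have hne : PySem.Chars.strip line ≠ [] := pv_classify_strip_ne _ _ hcl
          simp only [pvA_loop, h1, h2, if_pos, Bool.false_eq_true, ite_false]
          rw [ih]
          simp only [pvB_rec, hcl]
          have htr : pvA_truthy (some (PySem.Chars.strip line)) = true := by
            simp [pvA_truthy, hne]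
          rw [htr]
          simp only [Option.getD_some, PySem.Chars.join_singleton, pvA_emit]
          cases hcur : pvA_truthy cur <;> simp
        · have hcl : pvB_classify line = none := by
            simp only [pvB_classify]
            rw [if_neg (by exact h1), if_neg (by exact h2)]
          cases hcur : pvA_truthy cur with
          | false =>
              simp only [pvA_loop, h1, h2, hcur, Bool.false_eq_true, ite_false]
              rw [ih]
              simp only [pvB_rec, hcl, hcur, Bool.false_eq_true, ite_false]
          | true =>
              simp only [pvA_loop, h1, h2, hcur, Bool.false_eq_true, ite_false, ite_true]
              rw [ih]
              have htr : pvA_truthy (some (cur.getD [] ++ ' ' :: PySem.Chars.strip line)) = true := by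
                simp [pvA_truthy]
              rw [htr]
              simp only [pvB_rec, hcl, Option.getD_some, ite_true]
              rw [pv_join_absorb]

-- ===== VERDICT (by name: the statement is the Claim_ definition above) =====
theorem extract_courses_certifications_achievements_spec : Claim_equal_extract_courses_certifications_achievements := by
  intro cv_text _
  unfold Spec_extract_courses_certifications_achievements
  unfold extract_courses_certifications_achievements extract_courses_certifications_achievements_alt
  rw [pv_loop_eq]
  simp [pvA_truthy]
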